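-- pv_equiv track=rewrite | github.com/juandarr/advent-of-code | 2022/day10/day10-2.py | registerAndClock
-- ===== SOURCE A (Python) =====
-- def registerAndClock(instructions):
--     register = 1
--     sprite = range(register - 1, register + 2)
--     cycle = 0
--     display = list("." * 240)
--     for instruction in instructions:
--         if len(instruction) == 2:
--             for _ in range(2):
--                 cycle += 1
--
--                 crt = (cycle - 1) % 40
--                 pixel = (cycle - 1) % 240
--                 if crt in sprite:
--                     display[pixel] = "#"
--                 else:
--                     display[pixel] = "."
--             register += int(instruction[1])
--             sprite = range(register - 1, register + 2)
--         elif len(instruction) == 1: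
--             cycle += 1
--
--             crt = (cycle - 1) % 40
--             pixel = (cycle - 1) % 240
--             if crt in sprite:
--                 display[pixel] = "#"
--             else:
--                 display[pixel] = "."
--     output = []
--     for i in range(6):
--         tmp = ""
--         for j in range(40):
--             tmp += display[40 * i + j]
--         output.append(tmp)
--     out = "\n".join(output)
--     return out
-- ===== SOURCE B (Python) =====
-- def registerAndClock(instructions):
--     # pass 1: register value at each executed cycle
--     register = 1
--     regs = []
--     for instruction in instructions:
--         if len(instruction) == 1:
--             regs.append(register)
--         elif len(instruction) == 2:
--             regs.append(register)
--             regs.append(register)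
--             register += int(instruction[1])
--     # pass 2: render
--     display = ["."] * 240
--     for i, r in enumerate(regs):
--         display[i % 240] = "#" if abs(i % 40 - r) <= 1 else "."
--     return "\n".join("".join(display[40 * k:40 * k + 40]) for k in range(6))
-- ===== Notes on version B (the rewrite author's own statement) =====
-- stated objective: alternative
-- what changed: B replaces A's single interleaved simulation (register, sprite range, cycle counter and in-place CRT writes per instruction) by two independent passes: first a flat list of the register value at every executed cycle, then a render pass writing each pixel from its cycle index; rows come from slices instead of an index-accumulating inner loop.
import Mathlib
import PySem

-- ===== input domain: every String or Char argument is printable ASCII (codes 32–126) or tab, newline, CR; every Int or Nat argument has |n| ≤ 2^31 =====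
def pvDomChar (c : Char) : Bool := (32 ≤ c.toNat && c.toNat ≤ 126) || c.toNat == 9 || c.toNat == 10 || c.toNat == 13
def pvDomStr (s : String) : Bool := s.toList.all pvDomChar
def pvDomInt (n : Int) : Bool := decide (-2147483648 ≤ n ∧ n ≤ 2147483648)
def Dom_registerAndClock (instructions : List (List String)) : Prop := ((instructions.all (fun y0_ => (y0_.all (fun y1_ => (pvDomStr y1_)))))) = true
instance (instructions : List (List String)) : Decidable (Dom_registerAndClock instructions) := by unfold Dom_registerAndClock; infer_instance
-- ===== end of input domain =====

-- B re-renders the CRT in two independent passes (register trace, then pixels) instead of A's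
-- interleaved simulation; same cost, different decomposition. Return value only; no mutation.

-- ===== PORT A =====
-- one CRT cycle: cycle += 1; write display[(cycle-1)%240] from sprite membership
def pvCycleA (sp : Int × Int) (st : Int × List String) : Int × List String :=
  let cycle := st.1 + 1
  let crt := PySem.Int.mod (cycle - 1) 40
  let pixel := PySem.Int.mod (cycle - 1) 240
  (cycle, PySem.List.pySetD st.2 pixel (if sp.1 ≤ crt ∧ crt < sp.2 then "#" else "."))

-- the body of A's instruction loop; state = (register, sprite as (lo,hi), cycle, display)
def pvStepA (st : Int × (Int × Int) × Int × List String) (ins : List String) :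
    Int × (Int × Int) × Int × List String :=
  let reg := st.1
  let sp := st.2.1
  if ins.length = 2 then
    let cd := pvCycleA sp (pvCycleA sp (st.2.2.1, st.2.2.2))
    let reg' := reg + (PySem.Int.ofStr? (PySem.List.pyGetD ins 1 "")).getD 0
    (reg', (reg' - 1, reg' + 2), cd.1, cd.2)
  else if ins.length = 1 then
    let cd := pvCycleA sp (st.2.2.1, st.2.2.2)
    (reg, sp, cd.1, cd.2)
  else st

def registerAndClock (instructions : List (List String)) : String :=
  let st := instructions.foldl pvStepA (1, (0, 3), 0, List.replicate 240 ".")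
  let disp := st.2.2.2
  let output := (PySem.List.pyRange 0 6 1).foldl (fun out i =>
      out ++ [(PySem.List.pyRange 0 40 1).foldl
                (fun tmp j => tmp ++ PySem.List.pyGetD disp (40 * i + j) "") ""]) ([] : List String)
  PySem.Str.join "\n" output

-- ===== PORT B =====
-- pass 1: (final register, register value at each executed cycle)
def pvRegsB (instructions : List (List String)) : Int × List Int :=
  instructions.foldl (fun st ins =>
    if ins.length = 1 then (st.1, st.2 ++ [st.1])
    else if ins.length = 2 then
      (st.1 + (PySem.Int.ofStr? (PySem.List.pyGetD ins 1 "")).getD 0, st.2 ++ [st.1, st.1])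
    else st) (1, [])

def registerAndClock_alt (instructions : List (List String)) : String :=
  let regs := (pvRegsB instructions).2
  let disp := (PySem.List.enumerate regs).foldl (fun d p =>
      PySem.List.pySetD d (PySem.Int.mod p.1 240)
        (if (PySem.Int.mod p.1 40 - p.2).natAbs ≤ 1 then "#" else ".")) (List.replicate 240 ".")
  PySem.Str.join "\n" ((PySem.List.pyRange 0 6 1).map (fun k =>
      PySem.Str.join "" (PySem.List.slice disp (some (40 * k)) (some (40 * k + 40)))))

-- ===== PRECONDITION & SPEC =====
-- Pre_ excludes exactly the inputs where A raises ValueError: a length-2 instruction whose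
-- second entry is not a Python int literal.
def Pre_registerAndClock (instructions : List (List String)) : Prop :=
  ∀ ins ∈ instructions, ins.length = 2 →
    (PySem.Int.ofStr? (PySem.List.pyGetD ins 1 "")).isSome = true
instance (instructions : List (List String)) : Decidable (Pre_registerAndClock instructions) := by
  unfold Pre_registerAndClock; infer_instance
def pvWitness_registerAndClock : List (List String) := [["noop"], ["addx", "3"]]
def Spec_registerAndClock (instructions : List (List String)) (out : String) : Prop := out = registerAndClock_alt instructions
instance (instructions : List (List String)) (out : String) : Decidable (Spec_registerAndClock instructions out) := by unfold Spec_registerAndClock; infer_instance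

-- ===== CLAIM (what is proved, stated in full; the proofs are below) =====
def Claim_equal_registerAndClock : Prop := ∀ (instructions : List (List String)), Dom_registerAndClock instructions → Pre_registerAndClock instructions → Spec_registerAndClock instructions (registerAndClock instructions)

-- ===== LEMMAS AND PROOFS =====

-- the addx increment of an instruction
def pvDelta (ins : List String) : Int := (PySem.Int.ofStr? (PySem.List.pyGetD ins 1 "")).getD 0

-- recursive characterisation of the register trace
def pvRegsR : List (List String) → Int → List Int
  | [], _ => []
  | ins :: rest, r =>
    if ins.length = 1 then r :: pvRegsR rest r
    else if ins.length = 2 then r :: r :: pvRegsR rest (r + pvDelta ins)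
    else pvRegsR rest r

def pvRegFinal : List (List String) → Int → Int
  | [], r => r
  | ins :: rest, r =>
    if ins.length = 1 then pvRegFinal rest r
    else if ins.length = 2 then pvRegFinal rest (r + pvDelta ins)
    else pvRegFinal rest r

-- recursive renderer: write pixel for each cycle index n, n+1, …
def pvRenderR : List Int → Int → List String → List String
  | [], _, d => d
  | r :: rs, n, d =>
    pvRenderR rs (n + 1)
      (PySem.List.pySetD d (PySem.Int.mod n 240)
        (if (PySem.Int.mod n 40 - r).natAbs ≤ 1 then "#" else "."))

theorem pvRegsB_eq (instructions : List (List String)) :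
    ∀ (r : Int) (acc : List Int),
      instructions.foldl (fun st ins =>
        if ins.length = 1 then (st.1, st.2 ++ [st.1])
        else if ins.length = 2 then
          (st.1 + (PySem.Int.ofStr? (PySem.List.pyGetD ins 1 "")).getD 0, st.2 ++ [st.1, st.1])
        else st) (r, acc)
      = (pvRegFinal instructions r, acc ++ pvRegsR instructions r) := by
  induction instructions with
  | nil => intro r acc; simp [pvRegFinal, pvRegsR]
  | cons ins rest ih =>
    intro r acc
    by_cases h1 : ins.length = 1
    · simp [h1, pvRegFinal, pvRegsR, ih]
    · by_cases h2 : ins.length = 2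
      · simp [h2, pvRegFinal, pvRegsR, pvDelta, ih]
      · simp [h1, h2, pvRegFinal, pvRegsR, ih]

theorem pvRenderB_eq (regs : List Int) :
    ∀ (n : Int) (d : List String),
      (PySem.List.enumerate regs n).foldl (fun d p =>
        PySem.List.pySetD d (PySem.Int.mod p.1 240)
          (if (PySem.Int.mod p.1 40 - p.2).natAbs ≤ 1 then "#" else ".")) d
      = pvRenderR regs n d := by
  induction regs with
  | nil => intro n d; simp [PySem.List.enumerate_nil, pvRenderR]
  | cons r rs ih =>
    intro n d
    rw [PySem.List.enumerate_cons]
    simp only [List.foldl_cons]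
    rw [ih, pvRenderR]

theorem pvCond_eq (r c : Int) (x y : String) :
    (if r - 1 ≤ c ∧ c < r + 2 then x else y) = (if (c - r).natAbs ≤ 1 then x else y) := by
  by_cases h : r - 1 ≤ c ∧ c < r + 2
  · rw [if_pos h, if_pos (by omega)]
  · rw [if_neg h, if_neg (by omega)]

theorem pvSimA (instructions : List (List String)) :
    ∀ (r n : Int) (d : List String),
      instructions.foldl pvStepA (r, (r - 1, r + 2), n, d)
      = (pvRegFinal instructions r,
         (pvRegFinal instructions r - 1, pvRegFinal instructions r + 2),
         n + (pvRegsR instructions r).length,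
         pvRenderR (pvRegsR instructions r) n d) := by
  induction instructions with
  | nil => intro r n d; simp [pvRegFinal, pvRegsR, pvRenderR]
  | cons ins rest ih =>
    intro r n d
    by_cases h2 : ins.length = 2
    · have h1 : ¬ ins.length = 1 := by omega
      simp only [List.foldl_cons, pvStepA, pvCycleA]
      rw [if_pos h2]
      rw [ih]
      simp only [pvRegsR, pvRegFinal, pvDelta]
      simp only [if_neg h1, if_pos h2]
      simp only [show n + 1 - 1 = n from by ring, show n + 1 + 1 - 1 = n + 1 from by ring]
      rw [pvCond_eq r (PySem.Int.mod n 40), pvCond_eq r (PySem.Int.mod (n + 1) 40)]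
      refine Prod.ext rfl (Prod.ext rfl (Prod.ext ?_ rfl))
      show n + 1 + 1 + _ = n + _
      simp only [List.length_cons]
      push_cast
      ring
    · by_cases h1 : ins.length = 1
      · simp only [List.foldl_cons, pvStepA, pvCycleA]
        rw [if_neg h2, if_pos h1]
        rw [ih]
        simp only [pvRegsR, pvRegFinal]
        simp only [if_pos h1]
        simp only [show n + 1 - 1 = n from by ring]
        rw [pvCond_eq r (PySem.Int.mod n 40)]
        refine Prod.ext rfl (Prod.ext rfl (Prod.ext ?_ rfl))
        show n + 1 + _ = n + _
        simp only [List.length_cons]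
        push_cast
        ring
      · simp only [List.foldl_cons, pvStepA]
        rw [if_neg h2, if_neg h1]
        rw [ih]
        simp only [pvRegsR, pvRegFinal]
        simp only [if_neg h1, if_neg h2]

theorem pvRenderR_length (regs : List Int) :
    ∀ (n : Int) (d : List String), (pvRenderR regs n d).length = d.length := by
  induction regs with
  | nil => intro n d; simp [pvRenderR]
  | cons r rs ih =>
    intro n d
    rw [pvRenderR, ih]
    simp [PySem.List.length_pySetD]

-- accumulate-a-list foldl is a map
theorem pvFoldl_push {α β : Type} (g : α → β) (l : List α) :
    ∀ (init : List β),
      l.foldl (fun out i => out ++ [g i]) init = init ++ l.map g := by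
  induction l with
  | nil => intro init; simp
  | cons x xs ih => intro init; simp [ih]

theorem pvRowFold (d : List String) (a : Nat) :
    ∀ (n : Nat) (acc : String), a + n ≤ d.length →
      (List.range n).foldl (fun tmp j => tmp ++ d.getD (a + j) "") acc
      = acc ++ String.ofList ((((d.drop a).take n).map String.toList).flatten) := by
  intro n
  induction n with
  | zero =>
    intro acc _
    apply String.toList_injective
    simp
  | succ n ih =>
    intro acc h
    rw [List.range_succ, List.foldl_append, ih acc (by omega)]
    have hlt : a + n < d.length := by omega
    have hdn : (d.drop a).take (n + 1) = (d.drop a).take n ++ [d[a + n]] := by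
      rw [List.take_add_one]
      congr 1
      rw [List.getElem?_drop]
      simp [List.getElem?_eq_getElem hlt]
    rw [hdn]
    apply String.toList_injective
    simp [List.getD, List.getElem?_eq_getElem hlt]

theorem pvJoinNil (parts : List String) :
    PySem.Str.join "" parts = String.ofList ((parts.map String.toList).flatten) := by
  apply String.toList_injective
  rw [PySem.Str.toList_join]
  simp [PySem.Chars.join, List.intercalate]
  induction (parts.map String.toList) with
  | nil => simp
  | cons x xs ih =>
    cases xs with
    | nil => simp
    | cons y ys => simp_all [List.intersperse]

theorem registerAndClock_spec' (instructions : List (List String)) :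
    registerAndClock instructions = registerAndClock_alt instructions := by
  unfold registerAndClock registerAndClock_alt
  rw [show ((1 : Int), ((0 : Int), (3 : Int)), (0 : Int), List.replicate 240 ".") =
        ((1 : Int), ((1 : Int) - 1, (1 : Int) + 2), (0 : Int), List.replicate 240 ".") by norm_num,
      pvSimA, pvRegsB]
  rw [pvRegsB_eq instructions 1 []]
  simp only [List.nil_append]
  rw [pvRenderB_eq]
  set disp := pvRenderR (pvRegsR instructions 1) 0 (List.replicate 240 ".") with hdisp
  have hlen : disp.length = 240 := by
    rw [hdisp, pvRenderR_length, List.length_replicate]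
  rw [pvFoldl_push, List.nil_append]
  apply congrArg
  apply List.map_congr_left
  intro k hk
  rw [PySem.List.mem_pyRange_one] at hk
  obtain ⟨hk0, hk6⟩ := hk
  -- k = ↑k.toNat
  obtain ⟨m, rfl⟩ : ∃ m : Nat, k = (m : Int) := ⟨k.toNat, (Int.toNat_of_nonneg hk0).symm⟩
  have hm6 : m < 6 := by exact_mod_cast hk6
  have h40 : (40 : Int) * (m : Int) = ((40 * m : Nat) : Int) := by push_cast; ring
  have h40' : (40 : Int) * (m : Int) + 40 = ((40 * m : Nat) : Int) + ((40 : Nat) : Int) := by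
    push_cast; ring
  rw [h40', ← h40]
  rw [h40, PySem.List.slice_natCast_add disp (40 * m) 40, pvJoinNil]
  -- A's inner fold over pyRange 0 40 1
  rw [PySem.List.pyRange_one]
  norm_num
  rw [List.foldl_map]
  rw [show Int.toNat 40 = 40 from rfl]
  have hidx : ∀ (tmp : String) (j : Nat),
      tmp ++ PySem.List.pyGetD disp (40 * (m : Int) + (j : Int)) ""
      = tmp ++ disp.getD (40 * m + j) "" := by
    intro tmp j
    congr 1
    have hc : 40 * (m : Int) + (j : Int) = ((40 * m + j : Nat) : Int) := by push_cast; ring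
    rw [hc]
    exact PySem.List.pyGetD_natCast disp (40 * m + j) ""
  simp only [hidx]
  rw [pvRowFold disp (40 * m) 40 "" (by omega)]
  apply String.toList_injective
  simp [List.map_take, List.map_drop]

-- ===== VERDICT (by name: the statement is the Claim_ definition above) =====
theorem registerAndClock_spec : Claim_equal_registerAndClock := by
  intro instructions _ _
  exact registerAndClock_spec' instructions
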